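-- pv_equiv track=rewrite | github.com/orcohennn/GomokuAI | src/Agents/qlearningagent.py | count_adjacent_cells
-- ===== SOURCE A (Python) =====
-- def count_adjacent_cells(board, player):
--     """Counts the number of adjacent cells that have the same player's stones for all stones on the board."""
--     directions = [(1, 0), (0, 1), (1, 1), (1, -1)]  # Horizontal, Vertical, Diagonal, Anti-diagonal
--     total_adjacent_count = 0
--
--     for row in range(len(board)):
--         for col in range(len(board[0])):
--             if board[row][col] == player:
--                 # Check adjacent cells for the player's stone at (row, col)
--                 for dr, dc in directions:
--                     count = 0
--
--                     # Check in one direction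
--                     for i in range(1, 5):  # Check up to 4 cells in the direction
--                         r, c = row + dr * i, col + dc * i
--                         if 0 <= r < len(board) and 0 <= c < len(board[0]) and board[r][c] == player:
--                             count += 1
--                         else:
--                             break
--
--                     # Check in the opposite direction
--                     for i in range(1, 5):  # Check up to 4 cells in the opposite direction
--                         r, c = row - dr * i, col - dc * i
--                         if 0 <= r < len(board) and 0 <= c < len(board[0]) and board[r][c] == player:
--                             count += 1
--                         else:
--                             break
--
--                     # Add this count to the total adjacent count
--                     total_adjacent_count += count
--
--     return total_adjacent_count
-- ===== SOURCE B (Python) =====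
-- def count_adjacent_cells(board, player):
--     """Counts the number of adjacent cells that have the same player's stones for all stones on the board."""
--     h = len(board)
--     w = len(board[0]) if board else 0
--     total = 0
--     # Count, for each direction, the fully-occupied segments of i+1 consecutive player
--     # stones (i = 1..4): each stone starts the segments that extend i cells ahead of it,
--     # and each such segment is seen once from each of its two end stones, hence counts 2.
--     for dr, dc in ((1, 0), (0, 1), (1, 1), (1, -1)):
--         for r in range(h):
--             for c in range(w):
--                 if board[r][c] == player:
--                     for i in range(1, 5):
--                         if all(0 <= r + dr * j < h and 0 <= c + dc * j < w
--                                and board[r + dr * j][c + dc * j] == player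
--                                for j in range(1, i + 1)):
--                             total += 2
--     return total
-- ===== Notes on version B (the rewrite author's own statement) =====
-- stated objective: alternative
-- what changed: Instead of scanning up to 4 cells forward and backward from every stone with break-on-miss, B counts fully-occupied segments: for each direction it counts, per stone, the segment lengths i=1..4 for which the i cells ahead all hold the player's stone, adding 2 per segment (one for each of its two end stones).
import Mathlib
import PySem

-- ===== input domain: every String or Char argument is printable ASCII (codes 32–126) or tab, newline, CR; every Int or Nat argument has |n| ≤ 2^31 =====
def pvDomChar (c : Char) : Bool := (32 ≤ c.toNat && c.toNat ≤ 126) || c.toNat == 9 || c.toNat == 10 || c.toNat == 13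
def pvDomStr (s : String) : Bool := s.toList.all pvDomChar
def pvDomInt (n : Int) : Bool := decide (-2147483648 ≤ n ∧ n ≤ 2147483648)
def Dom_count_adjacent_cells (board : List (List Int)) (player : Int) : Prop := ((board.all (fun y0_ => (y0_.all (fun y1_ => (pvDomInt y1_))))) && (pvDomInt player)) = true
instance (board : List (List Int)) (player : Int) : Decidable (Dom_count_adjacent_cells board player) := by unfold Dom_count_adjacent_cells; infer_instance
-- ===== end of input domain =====

-- B re-counts the same adjacency total by enumerating fully-occupied segments (direction × length 1..4)
-- instead of A's per-stone forward/backward break-scans; same cost class, different decomposition.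

-- ===== PORT A =====
-- board[r][c] as an Option (none = out of range); shared by both ports, since both Pythons read
-- cells with the same expression. In A every read is either bounds-guarded or, for
-- board[row][col], in range on every input admitted by Pre_.
def pvAtA (board : List (List Int)) (r c : Int) : Option Int :=
  (PySem.List.pyGet? board r).bind (fun row => PySem.List.pyGet? row c)
def pvCondA (board : List (List Int)) (w player r c : Int) : Bool :=
  decide (0 ≤ r) && decide (r < (board.length : Int)) && decide (0 ≤ c) && decide (c < w) &&
    (pvAtA board r c == some player)
def pvScanA (board : List (List Int)) (w player row col dr dc : Int) : Nat → Int → Int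
  | 0, _ => 0
  | n + 1, i =>
    if pvCondA board w player (row + dr * i) (col + dc * i) then
      1 + pvScanA board w player row col dr dc n (i + 1)
    else 0
def count_adjacent_cells (board : List (List Int)) (player : Int) : Int :=
  (PySem.List.pyRange 0 (board.length : Int) 1).foldl (fun acc row =>
    let w : Int := (((PySem.List.pyGet? board 0).getD []).length : Int)
    (PySem.List.pyRange 0 w 1).foldl (fun acc col =>
      if pvAtA board row col == some player then
        ([((1:Int),(0:Int)), (0,1), (1,1), (1,-1)]).foldl (fun acc dd =>
          acc + (pvScanA board w player row col dd.1 dd.2 4 1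
               + pvScanA board w player row col (-dd.1) (-dd.2) 4 1)) acc
      else acc) acc) 0
def pvCondB (board : List (List Int)) (h w player r c : Int) : Bool :=
  decide (0 ≤ r) && decide (r < h) && decide (0 ≤ c) && decide (c < w) &&
    ((PySem.List.pyGet? board r).bind (fun row => PySem.List.pyGet? row c) == some player)
-- 'all(… for j in range(1, i + 1))'
def pvSegB (board : List (List Int)) (h w player dr dc i r c : Int) : Bool :=
  (PySem.List.pyRange 1 (i + 1) 1).all (fun j =>
    pvCondB board h w player (r + dr * j) (c + dc * j))
def count_adjacent_cells_alt (board : List (List Int)) (player : Int) : Int :=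
  let h : Int := (board.length : Int)
  let w : Int := match board with | [] => 0 | r0 :: _ => (r0.length : Int)
  ([((1:Int),(0:Int)), (0,1), (1,1), (1,-1)]).foldl (fun acc dd =>
    (PySem.List.pyRange 0 h 1).foldl (fun acc r =>
      (PySem.List.pyRange 0 w 1).foldl (fun acc c =>
        if pvAtA board r c == some player then
          (PySem.List.pyRange 1 5 1).foldl (fun acc i =>
            if pvSegB board h w player dd.1 dd.2 i r c then acc + 2 else acc) acc
        else acc) acc) acc) 0

-- ===== PRECONDITION & SPEC =====
-- Pre_: every row is at least as long as the first row (len(board[0])); on shorter rows the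
-- Python (both A and B) raises IndexError at board[r][c].
def Pre_count_adjacent_cells (board : List (List Int)) (player : Int) : Prop :=
  ∀ row ∈ board, (board.headD []).length ≤ row.length
instance (board : List (List Int)) (player : Int) : Decidable (Pre_count_adjacent_cells board player) := by unfold Pre_count_adjacent_cells; infer_instance

def pvWitness_count_adjacent_cells : List (List Int) × Int := ([[1, 0], [1, 1]], 1)

def Spec_count_adjacent_cells (board : List (List Int)) (player : Int) (out : Int) : Prop := out = count_adjacent_cells_alt board player
instance (board : List (List Int)) (player : Int) (out : Int) : Decidable (Spec_count_adjacent_cells board player out) := by unfold Spec_count_adjacent_cells; infer_instance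

-- ===== CLAIM (what is proved, stated in full; the proofs are below) =====
def Claim_equal_count_adjacent_cells : Prop := ∀ (board : List (List Int)) (player : Int), Dom_count_adjacent_cells board player → Pre_count_adjacent_cells board player → Spec_count_adjacent_cells board player (count_adjacent_cells board player)

-- ===== LEMMAS AND PROOFS =====

-- full segment predicate (j = 0..i), the proof-side bridge between the two ports
def pvSeg (board : List (List Int)) (h w player dr dc i r c : Int) : Bool :=
  (PySem.List.pyRange 0 (i + 1) 1).all (fun j =>
    pvCondB board h w player (r + dr * j) (c + dc * j))

def pvI (b : Bool) : Int := if b then 1 else 0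
def pvT (board : List (List Int)) (player h w dr dc i : Int) : Int :=
  ((PySem.List.pyRange 0 h 1).map (fun r =>
    ((PySem.List.pyRange 0 w 1).map (fun c => pvI (pvSeg board h w player dr dc i r c))).sum)).sum
def pvTsh (board : List (List Int)) (player h w dr dc i : Int) : Int :=
  ((PySem.List.pyRange 0 h 1).map (fun r =>
    ((PySem.List.pyRange 0 w 1).map (fun c => pvI (pvSeg board h w player dr dc i (r - dr * i) (c - dc * i)))).sum)).sum

lemma foldl_if_add {α : Type} (l : List α) (p : α → Bool) (g : α → Int) (a : Int) :
    l.foldl (fun acc x => if p x then acc + g x else acc) a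
      = a + (l.map (fun x => if p x then g x else 0)).sum := by
  have e : (fun (acc : Int) x => if p x then acc + g x else acc)
      = (fun (acc : Int) x => acc + (if p x then g x else 0)) := by
    funext acc x; split <;> simp
  rw [e, PySem.List.foldl_add]

lemma condAB (board : List (List Int)) (w player r c : Int) :
    pvCondA board w player r c = pvCondB board (board.length : Int) w player r c := rfl

lemma scan_unfold (board : List (List Int)) (w player row col dr dc : Int) :
    pvScanA board w player row col dr dc 4 1 =
      if pvCondA board w player (row + dr * 1) (col + dc * 1) then 1 +
        (if pvCondA board w player (row + dr * 2) (col + dc * 2) then 1 +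
          (if pvCondA board w player (row + dr * 3) (col + dc * 3) then 1 +
            (if pvCondA board w player (row + dr * 4) (col + dc * 4) then (1:Int) else 0)
          else 0) else 0) else 0 := by
  norm_num [pvScanA]

lemma segU1 (b : List (List Int)) (h w p dr dc r c : Int) :
    pvSeg b h w p dr dc 1 r c
      = (pvCondB b h w p r c && pvCondB b h w p (r + dr * 1) (c + dc * 1)) := by
  simp only [pvSeg, show PySem.List.pyRange 0 (1+1) 1 = [0,1] from by decide,
    List.all_cons, List.all_nil, Bool.and_true, mul_zero, add_zero]

lemma segU2 (b : List (List Int)) (h w p dr dc r c : Int) :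
    pvSeg b h w p dr dc 2 r c
      = (pvCondB b h w p r c && (pvCondB b h w p (r + dr * 1) (c + dc * 1) &&
          pvCondB b h w p (r + dr * 2) (c + dc * 2))) := by
  simp only [pvSeg, show PySem.List.pyRange 0 (2+1) 1 = [0,1,2] from by decide,
    List.all_cons, List.all_nil, Bool.and_true, mul_zero, add_zero]

lemma segU3 (b : List (List Int)) (h w p dr dc r c : Int) :
    pvSeg b h w p dr dc 3 r c
      = (pvCondB b h w p r c && (pvCondB b h w p (r + dr * 1) (c + dc * 1) &&
          (pvCondB b h w p (r + dr * 2) (c + dc * 2) && pvCondB b h w p (r + dr * 3) (c + dc * 3)))) := by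
  simp only [pvSeg, show PySem.List.pyRange 0 (3+1) 1 = [0,1,2,3] from by decide,
    List.all_cons, List.all_nil, Bool.and_true, mul_zero, add_zero]

lemma segU4 (b : List (List Int)) (h w p dr dc r c : Int) :
    pvSeg b h w p dr dc 4 r c
      = (pvCondB b h w p r c && (pvCondB b h w p (r + dr * 1) (c + dc * 1) &&
          (pvCondB b h w p (r + dr * 2) (c + dc * 2) && (pvCondB b h w p (r + dr * 3) (c + dc * 3) &&
            pvCondB b h w p (r + dr * 4) (c + dc * 4))))) := by
  simp only [pvSeg, show PySem.List.pyRange 0 (4+1) 1 = [0,1,2,3,4] from by decide,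
    List.all_cons, List.all_nil, Bool.and_true, mul_zero, add_zero]

lemma segUsh1 (b : List (List Int)) (h w p dr dc r c : Int) :
    pvSeg b h w p dr dc 1 (r - dr * 1) (c - dc * 1)
      = (pvCondB b h w p (r - dr * 1) (c - dc * 1) && pvCondB b h w p r c) := by
  simp only [pvSeg, show PySem.List.pyRange 0 (1+1) 1 = [0,1] from by decide,
    List.all_cons, List.all_nil, Bool.and_true, mul_zero, add_zero]
  ring_nf

lemma segUsh2 (b : List (List Int)) (h w p dr dc r c : Int) :
    pvSeg b h w p dr dc 2 (r - dr * 2) (c - dc * 2)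
      = (pvCondB b h w p (r - dr * 2) (c - dc * 2) && (pvCondB b h w p (r - dr * 1) (c - dc * 1) &&
          pvCondB b h w p r c)) := by
  simp only [pvSeg, show PySem.List.pyRange 0 (2+1) 1 = [0,1,2] from by decide,
    List.all_cons, List.all_nil, Bool.and_true, mul_zero, add_zero]
  ring_nf

lemma segUsh3 (b : List (List Int)) (h w p dr dc r c : Int) :
    pvSeg b h w p dr dc 3 (r - dr * 3) (c - dc * 3)
      = (pvCondB b h w p (r - dr * 3) (c - dc * 3) && (pvCondB b h w p (r - dr * 2) (c - dc * 2) &&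
          (pvCondB b h w p (r - dr * 1) (c - dc * 1) && pvCondB b h w p r c))) := by
  simp only [pvSeg, show PySem.List.pyRange 0 (3+1) 1 = [0,1,2,3] from by decide,
    List.all_cons, List.all_nil, Bool.and_true, mul_zero, add_zero]
  ring_nf

lemma segUsh4 (b : List (List Int)) (h w p dr dc r c : Int) :
    pvSeg b h w p dr dc 4 (r - dr * 4) (c - dc * 4)
      = (pvCondB b h w p (r - dr * 4) (c - dc * 4) && (pvCondB b h w p (r - dr * 3) (c - dc * 3) &&
          (pvCondB b h w p (r - dr * 2) (c - dc * 2) && (pvCondB b h w p (r - dr * 1) (c - dc * 1) &&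
            pvCondB b h w p r c)))) := by
  simp only [pvSeg, show PySem.List.pyRange 0 (4+1) 1 = [0,1,2,3,4] from by decide,
    List.all_cons, List.all_nil, Bool.and_true, mul_zero, add_zero]
  ring_nf

lemma scanSumF (p q1 q2 q3 q4 : Bool) (hp : p = true) :
    (if q1 then 1 + (if q2 then 1 + (if q3 then 1 + (if q4 then (1:Int) else 0) else 0) else 0) else 0)
      = pvI (p && q1) + pvI (p && (q1 && q2)) + pvI (p && (q1 && (q2 && q3)))
        + pvI (p && (q1 && (q2 && (q3 && q4)))) := by
  subst hp; cases q1 <;> cases q2 <;> cases q3 <;> cases q4 <;> norm_num [pvI]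

lemma scanSumB (p q1 q2 q3 q4 : Bool) (hp : p = true) :
    (if q1 then 1 + (if q2 then 1 + (if q3 then 1 + (if q4 then (1:Int) else 0) else 0) else 0) else 0)
      = pvI (q1 && p) + pvI (q2 && (q1 && p)) + pvI (q3 && (q2 && (q1 && p)))
        + pvI (q4 && (q3 && (q2 && (q1 && p)))) := by
  subst hp; cases q1 <;> cases q2 <;> cases q3 <;> cases q4 <;> norm_num [pvI]

lemma fwdL (board : List (List Int)) (h w player row col dr dc : Int)
    (hh : h = (board.length : Int)) (hP : pvCondB board h w player row col = true) :
    pvScanA board w player row col dr dc 4 1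
      = pvI (pvSeg board h w player dr dc 1 row col) + pvI (pvSeg board h w player dr dc 2 row col)
        + pvI (pvSeg board h w player dr dc 3 row col) + pvI (pvSeg board h w player dr dc 4 row col) := by
  subst hh
  rw [scan_unfold]
  simp only [condAB]
  rw [segU1, segU2, segU3, segU4]
  exact scanSumF _ _ _ _ _ hP

lemma bwdL (board : List (List Int)) (h w player row col dr dc : Int)
    (hh : h = (board.length : Int)) (hP : pvCondB board h w player row col = true) :
    pvScanA board w player row col (-dr) (-dc) 4 1
      = pvI (pvSeg board h w player dr dc 1 (row - dr * 1) (col - dc * 1))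
        + pvI (pvSeg board h w player dr dc 2 (row - dr * 2) (col - dc * 2))
        + pvI (pvSeg board h w player dr dc 3 (row - dr * 3) (col - dc * 3))
        + pvI (pvSeg board h w player dr dc 4 (row - dr * 4) (col - dc * 4)) := by
  subst hh
  rw [scan_unfold]
  simp only [condAB]
  have e1 : row + -dr * 1 = row - dr * 1 := by ring
  have e2 : row + -dr * 2 = row - dr * 2 := by ring
  have e3 : row + -dr * 3 = row - dr * 3 := by ring
  have e4 : row + -dr * 4 = row - dr * 4 := by ring
  have f1 : col + -dc * 1 = col - dc * 1 := by ring
  have f2 : col + -dc * 2 = col - dc * 2 := by ring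
  have f3 : col + -dc * 3 = col - dc * 3 := by ring
  have f4 : col + -dc * 4 = col - dc * 4 := by ring
  rw [e1, e2, e3, e4, f1, f2, f3, f4]
  rw [segUsh1, segUsh2, segUsh3, segUsh4]
  exact scanSumB _ _ _ _ _ hP

lemma segP0 (b : List (List Int)) (h w p dr dc i r c : Int) (hi : 0 ≤ i)
    (hP : pvCondB b h w p r c = false) : pvSeg b h w p dr dc i r c = false := by
  apply List.all_eq_false.mpr
  refine ⟨0, ?_, ?_⟩
  · exact PySem.List.mem_pyRange_one.mpr (by omega)
  · simp only [mul_zero, add_zero, hP, Bool.false_eq_true, not_false_eq_true]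

lemma segsh0 (b : List (List Int)) (h w p dr dc i r c : Int) (hi : 0 ≤ i)
    (hP : pvCondB b h w p r c = false) :
    pvSeg b h w p dr dc i (r - dr * i) (c - dc * i) = false := by
  apply List.all_eq_false.mpr
  refine ⟨i, ?_, ?_⟩
  · exact PySem.List.mem_pyRange_one.mpr (by omega)
  · have e1 : r - dr * i + dr * i = r := by ring
    have e2 : c - dc * i + dc * i = c := by ring
    simp only [e1, e2, hP, Bool.false_eq_true, not_false_eq_true]

lemma ite_add4 (p : Bool) (a b c d : Int) :
    (if p then a + (b + (c + d)) else 0)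
      = (if p then a else 0) + ((if p then b else 0) + ((if p then c else 0) + (if p then d else 0))) := by
  cases p <;> simp

-- per-cell, per-direction: A's two break-scans equal the eight segment indicators
lemma cellL (board : List (List Int)) (h w player dr dc drn dcn : Int)
    (hdr : drn = -dr) (hdc : dcn = -dc) (hh : h = (board.length : Int)) (row col : Int) :
    (if pvCondB board h w player row col then
        pvScanA board w player row col dr dc 4 1 + pvScanA board w player row col drn dcn 4 1
      else 0)
      = (pvI (pvSeg board h w player dr dc 1 row col) + pvI (pvSeg board h w player dr dc 2 row col)
          + pvI (pvSeg board h w player dr dc 3 row col) + pvI (pvSeg board h w player dr dc 4 row col))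
        + (pvI (pvSeg board h w player dr dc 1 (row - dr * 1) (col - dc * 1))
          + pvI (pvSeg board h w player dr dc 2 (row - dr * 2) (col - dc * 2))
          + pvI (pvSeg board h w player dr dc 3 (row - dr * 3) (col - dc * 3))
          + pvI (pvSeg board h w player dr dc 4 (row - dr * 4) (col - dc * 4))) := by
  subst hdr; subst hdc
  cases hP : pvCondB board h w player row col with
  | true =>
    simp only [if_pos]
    rw [fwdL board h w player row col dr dc hh hP, bwdL board h w player row col dr dc hh hP]
  | false =>
    simp only [Bool.false_eq_true, if_false]
    rw [segP0 board h w player dr dc 1 row col (by norm_num) hP,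
        segP0 board h w player dr dc 2 row col (by norm_num) hP,
        segP0 board h w player dr dc 3 row col (by norm_num) hP,
        segP0 board h w player dr dc 4 row col (by norm_num) hP,
        segsh0 board h w player dr dc 1 row col (by norm_num) hP,
        segsh0 board h w player dr dc 2 row col (by norm_num) hP,
        segsh0 board h w player dr dc 3 row col (by norm_num) hP,
        segsh0 board h w player dr dc 4 row col (by norm_num) hP]
    norm_num [pvI]

lemma sum_pyRange_aux (f : Int → Int) (n : Nat) : ∀ a b : Int, b - a ≤ n →
    ((PySem.List.pyRange a b 1).map f).sum = ∑ x ∈ Finset.Ico a b, f x := by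
  induction n with
  | zero =>
    intro a b hab
    rw [PySem.List.pyRange_one_eq_nil (by omega), Finset.Ico_eq_empty (by omega)]; simp
  | succ n ih =>
    intro a b hab
    by_cases hba : b ≤ a
    · rw [PySem.List.pyRange_one_eq_nil hba, Finset.Ico_eq_empty (by omega)]; simp
    · have hba' : a < b := by omega
      rw [PySem.List.pyRange_one_cons hba', ← Finset.insert_Ico_add_one_left_eq_Ico hba',
        Finset.sum_insert (by simp), List.map_cons, List.sum_cons, ih (a+1) b (by omega)]

lemma sum_pyRange (f : Int → Int) (a b : Int) :
    ((PySem.List.pyRange a b 1).map f).sum = ∑ x ∈ Finset.Ico a b, f x :=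
  sum_pyRange_aux f (b - a).toNat a b (by omega)

lemma shift_sum (h w a b : Int) (Q : Int → Int → Bool)
    (hQ : ∀ x y, Q x y = true → 0 ≤ x ∧ x < h ∧ 0 ≤ y ∧ y < w ∧
            0 ≤ x + a ∧ x + a < h ∧ 0 ≤ y + b ∧ y + b < w) :
    (∑ r ∈ Finset.Ico (0:Int) h, ∑ c ∈ Finset.Ico (0:Int) w, (if Q (r - a) (c - b) then (1:Int) else 0))
      = ∑ r ∈ Finset.Ico (0:Int) h, ∑ c ∈ Finset.Ico (0:Int) w, (if Q r c then (1:Int) else 0) := by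
  rw [← Finset.sum_product', ← Finset.sum_product']
  rw [Finset.sum_boole, Finset.sum_boole]
  congr 1
  apply Finset.card_bij' (fun p _ => (p.1 - a, p.2 - b)) (fun p _ => (p.1 + a, p.2 + b))
  · intro p hp
    simp only [Finset.mem_filter, Finset.mem_product, Finset.mem_Ico] at hp ⊢
    obtain ⟨_, hq⟩ := hp
    have := hQ _ _ hq
    exact ⟨⟨by omega, by omega⟩, hq⟩
  · intro p hp
    simp only [Finset.mem_filter, Finset.mem_product, Finset.mem_Ico] at hp ⊢
    obtain ⟨_, hq⟩ := hp
    have := hQ _ _ hq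
    refine ⟨⟨by omega, by omega⟩, ?_⟩
    simpa using hq
  · intro p hp; simp
  · intro p hp; simp

lemma segBounds (b : List (List Int)) (h w p dr dc i x y : Int) (hi : 0 ≤ i)
    (hs : pvSeg b h w p dr dc i x y = true) :
    0 ≤ x ∧ x < h ∧ 0 ≤ y ∧ y < w ∧
      0 ≤ x + dr * i ∧ x + dr * i < h ∧ 0 ≤ y + dc * i ∧ y + dc * i < w := by
  have hall := List.all_eq_true.mp hs
  have h0 := hall 0 (PySem.List.mem_pyRange_one.mpr (by omega))
  have hi' := hall i (PySem.List.mem_pyRange_one.mpr (by omega))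
  simp only [pvCondB, Bool.and_eq_true, decide_eq_true_eq, mul_zero, add_zero] at h0 hi'
  exact ⟨h0.1.1.1.1, h0.1.1.1.2, h0.1.1.2, h0.1.2, hi'.1.1.1.1, hi'.1.1.1.2, hi'.1.1.2, hi'.1.2⟩

lemma Tsh_eq (board : List (List Int)) (player h w dr dc i : Int) (hi : 0 ≤ i) :
    pvTsh board player h w dr dc i = pvT board player h w dr dc i := by
  simp only [pvT, pvTsh, sum_pyRange, pvI]
  exact shift_sum h w (dr * i) (dc * i) (fun x y => pvSeg board h w player dr dc i x y)
    (fun x y hxy => segBounds board h w player dr dc i x y hi hxy)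

lemma S_eq (board : List (List Int)) (player h w dr dc i : Int) :
    ((PySem.List.pyRange 0 h 1).map (fun r =>
      ((PySem.List.pyRange 0 w 1).map (fun c =>
        if pvSeg board h w player dr dc i r c = true then (2:Int) else 0)).sum)).sum
      = pvT board player h w dr dc i + pvT board player h w dr dc i := by
  have cell : ∀ (b : Bool), (if b = true then (2:Int) else 0) = pvI b + pvI b := by
    intro b; cases b <;> simp [pvI]
  simp only [pvT, cell, PySem.List.sum_map_add_int]

lemma seg_split (b : List (List Int)) (h w p dr dc i r c : Int) (hi : 0 ≤ i) :
    pvSeg b h w p dr dc i r c = (pvCondB b h w p r c && pvSegB b h w p dr dc i r c) := by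
  simp only [pvSeg, pvSegB]
  rw [PySem.List.pyRange_one_cons (by omega : (0:Int) < i + 1)]
  simp only [List.all_cons, mul_zero, add_zero, zero_add]

lemma cellLB (board : List (List Int)) (h w player dr dc row col : Int) :
    (if pvCondB board h w player row col then
        (if pvSegB board h w player dr dc 1 row col then (2:Int) else 0)
          + ((if pvSegB board h w player dr dc 2 row col then (2:Int) else 0)
          + ((if pvSegB board h w player dr dc 3 row col then (2:Int) else 0)
          + (if pvSegB board h w player dr dc 4 row col then (2:Int) else 0)))
      else 0)
      = (if pvSeg board h w player dr dc 1 row col then (2:Int) else 0)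
          + ((if pvSeg board h w player dr dc 2 row col then (2:Int) else 0)
          + ((if pvSeg board h w player dr dc 3 row col then (2:Int) else 0)
          + (if pvSeg board h w player dr dc 4 row col then (2:Int) else 0))) := by
  rw [seg_split board h w player dr dc 1 row col (by norm_num),
      seg_split board h w player dr dc 2 row col (by norm_num),
      seg_split board h w player dr dc 3 row col (by norm_num),
      seg_split board h w player dr dc 4 row col (by norm_num)]
  cases pvCondB board h w player row col <;> simp
lemma pvT_fold (board : List (List Int)) (player h w dr dc i : Int) :
    ((PySem.List.pyRange 0 h 1).map (fun r =>
      ((PySem.List.pyRange 0 w 1).map (fun c => pvI (pvSeg board h w player dr dc i r c))).sum)).sum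
      = pvT board player h w dr dc i := rfl

lemma pvTsh_fold (board : List (List Int)) (player h w dr dc i : Int) :
    ((PySem.List.pyRange 0 h 1).map (fun r =>
      ((PySem.List.pyRange 0 w 1).map (fun c =>
        pvI (pvSeg board h w player dr dc i (r - dr * i) (c - dc * i)))).sum)).sum
      = pvTsh board player h w dr dc i := rfl

-- B's guarded cell body equals the four full-segment counts, for cells inside the grid
lemma cellB_mem (board : List (List Int)) (h w player dr dc : Int) :
    ∀ row ∈ PySem.List.pyRange 0 h 1,
      ((PySem.List.pyRange 0 w 1).map (fun col =>
        if pvAtA board row col == some player then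
          (if pvSegB board h w player dr dc 1 row col then (2:Int) else 0) + ((if pvSegB board h w player dr dc 2 row col then (2:Int) else 0) + ((if pvSegB board h w player dr dc 3 row col then (2:Int) else 0) + (if pvSegB board h w player dr dc 4 row col then (2:Int) else 0)))
        else 0)).sum
      = ((PySem.List.pyRange 0 w 1).map (fun col => (if pvSeg board h w player dr dc 1 row col then (2:Int) else 0) + ((if pvSeg board h w player dr dc 2 row col then (2:Int) else 0) + ((if pvSeg board h w player dr dc 3 row col then (2:Int) else 0) + (if pvSeg board h w player dr dc 4 row col then (2:Int) else 0))))).sum := by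
  intro row hrow
  refine congrArg List.sum (List.map_congr_left ?_)
  intro col hcol
  have hr := PySem.List.mem_pyRange_one.mp hrow
  have hc := PySem.List.mem_pyRange_one.mp hcol
  have hb : pvCondB board h w player row col = (pvAtA board row col == some player) := by
    simp only [pvCondB, pvAtA, decide_eq_true hr.1, decide_eq_true hr.2,
      decide_eq_true hc.1, decide_eq_true hc.2, Bool.true_and]
  rw [← hb]
  exact cellLB board h w player dr dc row col

theorem ports_eq (board : List (List Int)) (player : Int) :
    count_adjacent_cells board player = count_adjacent_cells_alt board player := by
  cases board with
  | nil => rfl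
  | cons r0 rest =>
    simp only [count_adjacent_cells, count_adjacent_cells_alt]
    simp only [show ((PySem.List.pyGet? (r0 :: rest) 0).getD []) = r0 from by
      simp [PySem.List.pyGet?, PySem.List.pyIdx?]]
    simp only [PySem.List.foldl_add, foldl_if_add]
    simp only [show PySem.List.pyRange 1 5 1 = [1,2,3,4] from by decide,
      List.map_cons, List.map_nil, List.sum_cons, List.sum_nil, add_zero, zero_add, neg_neg, neg_zero]
    have hcell : ∀ row ∈ PySem.List.pyRange 0 ((r0 :: rest).length : Int) 1,
        ((PySem.List.pyRange 0 (r0.length : Int) 1).map (fun col =>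
          if pvAtA (r0 :: rest) row col == some player then
            pvScanA (r0 :: rest) (r0.length : Int) player row col 1 0 4 1 + pvScanA (r0 :: rest) (r0.length : Int) player row col (-1) 0 4 1 + (pvScanA (r0 :: rest) (r0.length : Int) player row col 0 1 4 1 + pvScanA (r0 :: rest) (r0.length : Int) player row col 0 (-1) 4 1 + (pvScanA (r0 :: rest) (r0.length : Int) player row col 1 1 4 1 + pvScanA (r0 :: rest) (r0.length : Int) player row col (-1) (-1) 4 1 + (pvScanA (r0 :: rest) (r0.length : Int) player row col 1 (-1) 4 1 + pvScanA (r0 :: rest) (r0.length : Int) player row col (-1) 1 4 1)))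
          else 0)).sum
        = ((PySem.List.pyRange 0 (r0.length : Int) 1).map (fun col =>
            ((pvI (pvSeg (r0 :: rest) ((r0 :: rest).length : Int) (r0.length : Int) player 1 0 1 row col) + pvI (pvSeg (r0 :: rest) ((r0 :: rest).length : Int) (r0.length : Int) player 1 0 2 row col) + pvI (pvSeg (r0 :: rest) ((r0 :: rest).length : Int) (r0.length : Int) player 1 0 3 row col) + pvI (pvSeg (r0 :: rest) ((r0 :: rest).length : Int) (r0.length : Int) player 1 0 4 row col)) + (pvI (pvSeg (r0 :: rest) ((r0 :: rest).length : Int) (r0.length : Int) player 1 0 1 (row - 1 * 1) (col - 0 * 1)) + pvI (pvSeg (r0 :: rest) ((r0 :: rest).length : Int) (r0.length : Int) player 1 0 2 (row - 1 * 2) (col - 0 * 2)) + pvI (pvSeg (r0 :: rest) ((r0 :: rest).length : Int) (r0.length : Int) player 1 0 3 (row - 1 * 3) (col - 0 * 3)) + pvI (pvSeg (r0 :: rest) ((r0 :: rest).length : Int) (r0.length : Int) player 1 0 4 (row - 1 * 4) (col - 0 * 4)))) + (((pvI (pvSeg (r0 :: rest) ((r0 :: rest).length : Int) (r0.length : Int)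 player 0 1 1 row col) + pvI (pvSeg (r0 :: rest) ((r0 :: rest).length : Int) (r0.length : Int) player 0 1 2 row col) + pvI (pvSeg (r0 :: rest) ((r0 :: rest).length : Int) (r0.length : Int) player 0 1 3 row col) + pvI (pvSeg (r0 :: rest) ((r0 :: rest).length : Int) (r0.length : Int) player 0 1 4 row col)) + (pvI (pvSeg (r0 :: rest) ((r0 :: rest).length : Int) (r0.length : Int) player 0 1 1 (row - 0 * 1) (col - 1 * 1)) + pvI (pvSeg (r0 :: rest) ((r0 :: rest).length : Int) (r0.length : Int) player 0 1 2 (row - 0 * 2) (col - 1 * 2)) + pvI (pvSeg (r0 :: rest) ((r0 :: rest).length : Int) (r0.length : Int) player 0 1 3 (row - 0 * 3) (col - 1 * 3)) + pvI (pvSeg (r0 :: rest) ((r0 :: rest).length : Int) (r0.length : Int) player 0 1 4 (row - 0 * 4) (col - 1 * 4)))) + (((pvI (pvSeg (r0 :: rest) ((r0 :: rest).length : Int) (r0.length : Int) player 1 1 1 row col) + pvI (pvSeg (r0 :: rest) ((r0 :: rest).length : Int) (r0.length : Int) player 1 1 2 row col) + pvI (pvSeg (r0 :: rest) ((r0 ::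 rest).length : Int) (r0.length : Int) player 1 1 3 row col) + pvI (pvSeg (r0 :: rest) ((r0 :: rest).length : Int) (r0.length : Int) player 1 1 4 row col)) + (pvI (pvSeg (r0 :: rest) ((r0 :: rest).length : Int) (r0.length : Int) player 1 1 1 (row - 1 * 1) (col - 1 * 1)) + pvI (pvSeg (r0 :: rest) ((r0 :: rest).length : Int) (r0.length : Int) player 1 1 2 (row - 1 * 2) (col - 1 * 2)) + pvI (pvSeg (r0 :: rest) ((r0 :: rest).length : Int) (r0.length : Int) player 1 1 3 (row - 1 * 3) (col - 1 * 3)) + pvI (pvSeg (r0 :: rest) ((r0 :: rest).length : Int) (r0.length : Int) player 1 1 4 (row - 1 * 4) (col - 1 * 4)))) + ((pvI (pvSeg (r0 :: rest) ((r0 :: rest).length : Int) (r0.length : Int) player 1 (-1) 1 row col) + pvI (pvSeg (r0 :: rest) ((r0 :: rest).length : Int) (r0.length : Int) player 1 (-1) 2 row col) + pvI (pvSeg (r0 :: rest) ((r0 :: rest).length : Int) (r0.length : Int) player 1 (-1) 3 row col) + pvI (pvSeg (r0 :: rest) ((r0 :: rest).length : Int) (r0.length : Int) player 1 (-1) 4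 row col)) + (pvI (pvSeg (r0 :: rest) ((r0 :: rest).length : Int) (r0.length : Int) player 1 (-1) 1 (row - 1 * 1) (col - (-1) * 1)) + pvI (pvSeg (r0 :: rest) ((r0 :: rest).length : Int) (r0.length : Int) player 1 (-1) 2 (row - 1 * 2) (col - (-1) * 2)) + pvI (pvSeg (r0 :: rest) ((r0 :: rest).length : Int) (r0.length : Int) player 1 (-1) 3 (row - 1 * 3) (col - (-1) * 3)) + pvI (pvSeg (r0 :: rest) ((r0 :: rest).length : Int) (r0.length : Int) player 1 (-1) 4 (row - 1 * 4) (col - (-1) * 4)))))))).sum := by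
      intro row hrow
      refine congrArg List.sum (List.map_congr_left ?_)
      intro col hcol
      have hr := PySem.List.mem_pyRange_one.mp hrow
      have hc := PySem.List.mem_pyRange_one.mp hcol
      have hb : pvCondB (r0 :: rest) ((r0 :: rest).length : Int) (r0.length : Int) player row col
          = (pvAtA (r0 :: rest) row col == some player) := by
        simp only [pvCondB, pvAtA, decide_eq_true hr.1, decide_eq_true hr.2,
          decide_eq_true hc.1, decide_eq_true hc.2, Bool.true_and]
      rw [← hb]
      rw [ite_add4,
        cellL (r0 :: rest) ((r0 :: rest).length : Int) (r0.length : Int) player 1 0 (-1) 0 (by norm_num) (by norm_num) rfl row col,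
        cellL (r0 :: rest) ((r0 :: rest).length : Int) (r0.length : Int) player 0 1 0 (-1) (by norm_num) (by norm_num) rfl row col,
        cellL (r0 :: rest) ((r0 :: rest).length : Int) (r0.length : Int) player 1 1 (-1) (-1) (by norm_num) (by norm_num) rfl row col,
        cellL (r0 :: rest) ((r0 :: rest).length : Int) (r0.length : Int) player 1 (-1) (-1) 1 (by norm_num) (by norm_num) rfl row col]
    rw [List.map_congr_left hcell,
        List.map_congr_left (cellB_mem (r0 :: rest) ((r0 :: rest).length : Int) (r0.length : Int) player 1 0),
        List.map_congr_left (cellB_mem (r0 :: rest) ((r0 :: rest).length : Int) (r0.length : Int) player 0 1),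
        List.map_congr_left (cellB_mem (r0 :: rest) ((r0 :: rest).length : Int) (r0.length : Int) player 1 1),
        List.map_congr_left (cellB_mem (r0 :: rest) ((r0 :: rest).length : Int) (r0.length : Int) player 1 (-1))]
    simp only [PySem.List.sum_map_add_int]
    simp only [S_eq, pvTsh_fold, pvT_fold]
    rw [        Tsh_eq (r0 :: rest) player ((r0 :: rest).length : Int) (r0.length : Int) 1 0 1 (by norm_num),
        Tsh_eq (r0 :: rest) player ((r0 :: rest).length : Int) (r0.length : Int) 1 0 2 (by norm_num),
        Tsh_eq (r0 :: rest) player ((r0 :: rest).length : Int) (r0.length : Int) 1 0 3 (by norm_num),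
        Tsh_eq (r0 :: rest) player ((r0 :: rest).length : Int) (r0.length : Int) 1 0 4 (by norm_num),
        Tsh_eq (r0 :: rest) player ((r0 :: rest).length : Int) (r0.length : Int) 0 1 1 (by norm_num),
        Tsh_eq (r0 :: rest) player ((r0 :: rest).length : Int) (r0.length : Int) 0 1 2 (by norm_num),
        Tsh_eq (r0 :: rest) player ((r0 :: rest).length : Int) (r0.length : Int) 0 1 3 (by norm_num),
        Tsh_eq (r0 :: rest) player ((r0 :: rest).length : Int) (r0.length : Int) 0 1 4 (by norm_num),
        Tsh_eq (r0 :: rest) player ((r0 :: rest).length : Int) (r0.length : Int) 1 1 1 (by norm_num),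
        Tsh_eq (r0 :: rest) player ((r0 :: rest).length : Int) (r0.length : Int) 1 1 2 (by norm_num),
        Tsh_eq (r0 :: rest) player ((r0 :: rest).length : Int) (r0.length : Int) 1 1 3 (by norm_num),
        Tsh_eq (r0 :: rest) player ((r0 :: rest).length : Int) (r0.length : Int) 1 1 4 (by norm_num),
        Tsh_eq (r0 :: rest) player ((r0 :: rest).length : Int) (r0.length : Int) 1 (-1) 1 (by norm_num),
        Tsh_eq (r0 :: rest) player ((r0 :: rest).length : Int) (r0.length : Int) 1 (-1) 2 (by norm_num),
        Tsh_eq (r0 :: rest) player ((r0 :: rest).length : Int) (r0.length : Int) 1 (-1) 3 (by norm_num),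
        Tsh_eq (r0 :: rest) player ((r0 :: rest).length : Int) (r0.length : Int) 1 (-1) 4 (by norm_num)]
    ring

-- ===== VERDICT (by name: the statement is the Claim_ definition above) =====
theorem count_adjacent_cells_spec : Claim_equal_count_adjacent_cells := by
  intro board player _hDom _hPre
  show count_adjacent_cells board player = count_adjacent_cells_alt board player
  exact ports_eq board player
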